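-- pv_equiv track=rewrite | github.com/bindas1/aoc-solutions | 2023/1.py | get_first_and_last_digit
-- ===== SOURCE A (Python) =====
-- def get_first_and_last_digit(word):
--     first_digit = None
--     last_digit = None
--
--     for letter in word:
--         if letter.isdigit():
--             first_digit = int(letter)
--             break
--     for letter in word[::-1]:
--         if letter.isdigit():
--             last_digit = int(letter)
--             break
--
--     return first_digit, last_digit
-- ===== SOURCE B (Python) =====
-- def get_first_and_last_digit(word):
--     digits = []
--     for letter in word:
--         if letter.isdigit():
--             digits.append(int(letter))
--     if digits:
--         return digits[0], digits[-1]
--     return None, None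
-- ===== Notes on version B (the rewrite author's own statement) =====
-- stated objective: simpler
-- what changed: Replaces A's two early-terminating scans (forward and over a materialized reversed copy of the string) with one forward pass that collects all digits and then reads the first and last element of that list.
import Mathlib
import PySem

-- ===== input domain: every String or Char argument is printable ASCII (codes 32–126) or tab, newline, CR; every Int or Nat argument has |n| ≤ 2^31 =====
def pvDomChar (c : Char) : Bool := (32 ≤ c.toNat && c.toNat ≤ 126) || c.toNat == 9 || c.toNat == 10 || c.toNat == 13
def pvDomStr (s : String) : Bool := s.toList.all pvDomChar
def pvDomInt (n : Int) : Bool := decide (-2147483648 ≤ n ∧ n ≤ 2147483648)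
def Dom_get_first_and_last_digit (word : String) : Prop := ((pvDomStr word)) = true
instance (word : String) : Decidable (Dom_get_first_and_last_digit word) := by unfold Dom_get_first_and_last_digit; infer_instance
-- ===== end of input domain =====

-- B replaces A's two early-terminating scans (forward, and over word[::-1]) with one
-- forward pass collecting all digits, then reading the ends of that list (objective: simpler).

-- ===== PORT A =====
-- int(letter) for a digit character letter: exact as c.toNat - 48 on '0'..'9'
def pvDigitVal (c : Char) : Int := (c.toNat : Int) - 48

-- 'for letter in …: if letter.isdigit(): x = int(letter); break' with x initially None
def pvScanDigit : List Char → Option Int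
  | [] => none
  | c :: rest => if PySem.Chars.isdigit c then some (pvDigitVal c) else pvScanDigit rest

def get_first_and_last_digit (word : String) : Option Int × Option Int :=
  let first_digit := pvScanDigit word.toList
  -- word[::-1] is the reversed string (PySem.Str.slice?_none_none_neg_one)
  let last_digit := pvScanDigit word.toList.reverse
  (first_digit, last_digit)

-- ===== PORT B =====
def get_first_and_last_digit_alt (word : String) : Option Int × Option Int :=
  let digits := word.toList.filterMap
    (fun c => if PySem.Chars.isdigit c then some (pvDigitVal c) else none)
  match digits with
  | [] => (none, none)
  | d :: _ => (some d, digits.getLast?)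

-- ===== PRECONDITION & SPEC =====
def Spec_get_first_and_last_digit (word : String) (out : Option Int × Option Int) : Prop := out = get_first_and_last_digit_alt word
instance (word : String) (out : Option Int × Option Int) : Decidable (Spec_get_first_and_last_digit word out) := by unfold Spec_get_first_and_last_digit; infer_instance

-- ===== CLAIM (what is proved, stated in full; the proofs are below) =====
def Claim_equal_get_first_and_last_digit : Prop := ∀ (word : String), Dom_get_first_and_last_digit word → Spec_get_first_and_last_digit word (get_first_and_last_digit word)

-- ===== LEMMAS AND PROOFS =====
theorem pvScanDigit_eq_head? (l : List Char) :
    pvScanDigit l = (l.filterMap (fun c => if PySem.Chars.isdigit c then some (pvDigitVal c) else none)).head? := by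
  induction l with
  | nil => rfl
  | cons c rest ih =>
    by_cases h : PySem.Chars.isdigit c = true <;>
      simp [pvScanDigit, h, ih]

-- ===== VERDICT (by name: the statement is the Claim_ definition above) =====
theorem get_first_and_last_digit_spec : Claim_equal_get_first_and_last_digit := by
  intro word _
  unfold Spec_get_first_and_last_digit get_first_and_last_digit get_first_and_last_digit_alt
  rw [pvScanDigit_eq_head?, pvScanDigit_eq_head?, List.filterMap_reverse, List.head?_reverse]
  cases h : word.toList.filterMap (fun c => if PySem.Chars.isdigit c then some (pvDigitVal c) else none) <;>
    simp [h]
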